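-- pv_equiv track=rewrite | github.com/HeshamAbedelatty/Building-a-process-discovery-technique-Alpha-algorithm- | process discovery technique (Alpha algorithm).py | getTw
-- ===== SOURCE A (Python) =====
-- def getTw(Traces):
--     res = []
--     for inner_list in Traces:
--         for i in inner_list:
--             if i not in res:
--                 res.append(i)
--     res.sort()
--     return res
-- ===== SOURCE B (Python) =====
-- def getTw(Traces):
--     flat = []
--     for inner_list in Traces:
--         for i in inner_list:
--             flat.append(i)
--     flat.sort()
--     res = []
--     for x in flat:
--         if not res or res[-1] != x:
--             res.append(x)
--     return res
-- ===== Notes on version B (the rewrite author's own statement) =====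
-- stated objective: faster
-- what changed: Replaces the quadratic dedup-by-membership-scan accumulator with flatten + sort + one adjacent-dedup pass over the sorted list.
import Mathlib
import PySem

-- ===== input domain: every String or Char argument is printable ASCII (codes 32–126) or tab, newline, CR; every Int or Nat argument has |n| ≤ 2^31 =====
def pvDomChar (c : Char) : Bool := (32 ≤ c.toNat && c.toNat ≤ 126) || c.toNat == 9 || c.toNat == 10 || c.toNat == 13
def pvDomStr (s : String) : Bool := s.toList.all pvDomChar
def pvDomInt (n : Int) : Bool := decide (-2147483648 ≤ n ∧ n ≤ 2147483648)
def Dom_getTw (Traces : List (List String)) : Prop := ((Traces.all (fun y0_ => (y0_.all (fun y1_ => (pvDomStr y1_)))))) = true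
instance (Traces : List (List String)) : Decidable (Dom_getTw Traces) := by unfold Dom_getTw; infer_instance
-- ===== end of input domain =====

-- B replaces A's quadratic membership-scan dedup with flatten + sort + one adjacent-dedup pass (faster).
-- A mutates nothing observable besides its local list; the equivalence is about the return value.

-- ===== PORT A =====
-- res accumulated with an `i not in res` membership test, then res.sort()
def getTw (Traces : List (List String)) : List String :=
  PySem.List.sorted
    (Traces.foldl
      (fun res inner_list =>
        inner_list.foldl (fun res i => if i ∈ res then res else res ++ [i]) res)
      [])
    (fun x => x) false

-- ===== PORT B =====
-- flatten everything, sort, then keep an element only when it differs from the last kept one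
def getTw_alt (Traces : List (List String)) : List String :=
  (PySem.List.sorted
      (Traces.foldl (fun flat inner_list => inner_list.foldl (fun flat i => flat ++ [i]) flat) [])
      (fun x => x) false).foldl
    (fun res x => if res = [] ∨ res.getLast? ≠ some x then res ++ [x] else res) []

-- ===== PRECONDITION & SPEC =====
def Spec_getTw (Traces : List (List String)) (out : List String) : Prop := out = getTw_alt Traces
instance (Traces : List (List String)) (out : List String) : Decidable (Spec_getTw Traces out) := by unfold Spec_getTw; infer_instance

-- ===== CLAIM (what is proved, stated in full; the proofs are below) =====
def Claim_equal_getTw : Prop := ∀ (Traces : List (List String)), Dom_getTw Traces → Spec_getTw Traces (getTw Traces)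

-- ===== LEMMAS AND PROOFS =====

-- A's inner loop: dedup-append keeps Nodup and collects exactly old ∪ new elements
theorem dedupFold_inner (xs acc : List String) (h : acc.Nodup) :
    (xs.foldl (fun res i => if i ∈ res then res else res ++ [i]) acc).Nodup ∧
    (∀ y, y ∈ xs.foldl (fun res i => if i ∈ res then res else res ++ [i]) acc ↔ y ∈ acc ∨ y ∈ xs) := by
  induction xs generalizing acc with
  | nil => simp [h]
  | cons x xs ih =>
    simp only [List.foldl_cons]
    by_cases hx : x ∈ acc
    · simp only [if_pos hx]
      obtain ⟨h1, h2⟩ := ih acc h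
      refine ⟨h1, fun y => ?_⟩
      rw [h2, List.mem_cons]
      constructor
      · rintro (hy | hy)
        · exact Or.inl hy
        · exact Or.inr (Or.inr hy)
      · rintro (hy | rfl | hy)
        · exact Or.inl hy
        · exact Or.inl hx
        · exact Or.inr hy
    · simp only [if_neg hx]
      have hnd : (acc ++ [x]).Nodup := by
        rw [List.nodup_append]
        refine ⟨h, by simp, ?_⟩
        intro a ha b hb
        simp only [List.mem_singleton] at hb
        subst hb
        exact fun h' => hx (h' ▸ ha)
      obtain ⟨h1, h2⟩ := ih (acc ++ [x]) hnd
      refine ⟨h1, fun y => ?_⟩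
      rw [h2, List.mem_append, List.mem_singleton, List.mem_cons]
      tauto

-- A's outer loop over the traces
theorem dedupFold_outer (ts : List (List String)) (acc : List String) (h : acc.Nodup) :
    (ts.foldl (fun res inner => inner.foldl (fun res i => if i ∈ res then res else res ++ [i]) res) acc).Nodup ∧
    (∀ y, y ∈ ts.foldl (fun res inner => inner.foldl (fun res i => if i ∈ res then res else res ++ [i]) res) acc ↔
        y ∈ acc ∨ ∃ l ∈ ts, y ∈ l) := by
  induction ts generalizing acc with
  | nil => simp [h]
  | cons t ts ih =>
    simp only [List.foldl_cons]
    obtain ⟨h1, h2⟩ := dedupFold_inner t acc h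
    obtain ⟨h3, h4⟩ := ih _ h1
    refine ⟨h3, fun y => ?_⟩
    rw [h4, h2]
    simp only [List.mem_cons]
    constructor
    · rintro ((hy | hy) | ⟨l, hl, hyl⟩)
      · exact Or.inl hy
      · exact Or.inr ⟨t, by simp, hy⟩
      · exact Or.inr ⟨l, by simp [hl], hyl⟩
    · rintro (hy | ⟨l, hl, hyl⟩)
      · exact Or.inl (Or.inl hy)
      · rcases hl with rfl | hl
        · exact Or.inl (Or.inr hyl)
        · exact Or.inr ⟨l, hl, hyl⟩

-- B's flatten loop collects exactly the elements of the traces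
theorem flatFold_mem (ts : List (List String)) (acc : List String) :
    ∀ y, y ∈ ts.foldl (fun flat inner => inner.foldl (fun flat i => flat ++ [i]) flat) acc ↔
      y ∈ acc ∨ ∃ l ∈ ts, y ∈ l := by
  have inner : ∀ (xs acc : List String) y,
      y ∈ xs.foldl (fun flat i => flat ++ [i]) acc ↔ y ∈ acc ∨ y ∈ xs := by
    intro xs
    induction xs with
    | nil => simp
    | cons x xs ih =>
      intro acc y
      simp only [List.foldl_cons, ih, List.mem_append, List.mem_cons]
      tauto
  induction ts generalizing acc with
  | nil => simp
  | cons t ts ih =>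
    intro y
    simp only [List.foldl_cons, ih, inner, List.mem_cons]
    constructor
    · rintro ((hy | hy) | ⟨l, hl, hyl⟩)
      · exact Or.inl hy
      · exact Or.inr ⟨t, by simp, hy⟩
      · exact Or.inr ⟨l, by simp [hl], hyl⟩
    · rintro (hy | ⟨l, hl, hyl⟩)
      · exact Or.inl (Or.inl hy)
      · rcases hl with rfl | hl
        · exact Or.inl (Or.inr hyl)
        · exact Or.inr ⟨l, hl, hyl⟩

-- in a ≤-sorted list every element is ≤ the last one
theorem le_getLast_of_pairwise : ∀ (xs : List String), xs.Pairwise (· ≤ ·) →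
    ∀ a ∈ xs, ∀ l, xs.getLast? = some l → a ≤ l := by
  intro xs
  induction xs with
  | nil => intro _ a ha; simp at ha
  | cons x xs ih =>
    intro h a ha l hl
    rcases List.pairwise_cons.mp h with ⟨hx, hxs⟩
    cases xs with
    | nil =>
      simp at ha hl
      simp [ha, hl]
    | cons z zs =>
      have hl' : (z :: zs).getLast? = some l := by
        simpa [List.getLast?_cons_cons] using hl
      rcases List.mem_cons.mp ha with rfl | ha'
      · exact le_trans (hx z (by simp)) (ih hxs z (by simp) l hl')
      · exact ih hxs a ha' l hl'

-- B's adjacent-dedup pass on a ≤-sorted input: strictly increasing output with the same members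
theorem adjDedup_spec (xs : List String) (hs : xs.Pairwise (· ≤ ·)) (acc : List String)
    (hacc : acc.Pairwise (· < ·)) (hle : ∀ a ∈ acc, ∀ x ∈ xs, a ≤ x) :
    (xs.foldl (fun res x => if res = [] ∨ res.getLast? ≠ some x then res ++ [x] else res) acc).Pairwise (· < ·) ∧
    (∀ y, y ∈ xs.foldl (fun res x => if res = [] ∨ res.getLast? ≠ some x then res ++ [x] else res) acc ↔
      y ∈ acc ∨ y ∈ xs) := by
  induction xs generalizing acc with
  | nil => exact ⟨hacc, fun y => by simp⟩
  | cons x xs ih =>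
    rcases List.pairwise_cons.mp hs with ⟨hx, hxs⟩
    simp only [List.foldl_cons]
    by_cases hc : acc = [] ∨ acc.getLast? ≠ some x
    · simp only [if_pos hc]
      have hlt : ∀ a ∈ acc, a < x := by
        intro a ha
        have hle' : a ≤ x := hle a ha x (by simp)
        rcases lt_or_eq_of_le hle' with h | rfl
        · exact h
        · -- a = x ∈ acc: then last = a, contradicting hc
          exfalso
          cases acc with
          | nil => simp at ha
          | cons b bs =>
            obtain ⟨l, hl⟩ : ∃ l, (b :: bs).getLast? = some l := by
              cases hgl : (b :: bs).getLast? with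
              | none => simp at hgl
              | some v => exact ⟨v, rfl⟩
            have h1 : a ≤ l := le_getLast_of_pairwise _ (hacc.imp le_of_lt) a ha l hl
            have h2 : l ≤ a := hle l (List.mem_of_getLast? hl) a (by simp)
            have : l = a := le_antisymm h2 h1
            rcases hc with hc | hc
            · simp at hc
            · exact hc (by rw [hl, this])
      have hacc' : (acc ++ [x]).Pairwise (· < ·) := by
        rw [List.pairwise_append]
        exact ⟨hacc, by simp, by simpa using hlt⟩
      have hle' : ∀ a ∈ acc ++ [x], ∀ z ∈ xs, a ≤ z := by
        intro a ha z hz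
        rcases List.mem_append.mp ha with ha | ha
        · exact le_trans (hle a ha x (by simp)) (hx z hz)
        · simp at ha; subst ha; exact hx z hz
      obtain ⟨h1, h2⟩ := ih hxs (acc ++ [x]) hacc' hle'
      refine ⟨h1, fun y => ?_⟩
      rw [h2]
      simp [or_assoc]
    · simp only [if_neg hc]
      rw [not_or, not_not] at hc
      obtain ⟨-, hl⟩ := hc
      have hxmem : x ∈ acc := List.mem_of_getLast? hl
      have hle' : ∀ a ∈ acc, ∀ z ∈ xs, a ≤ z := fun a ha z hz =>
        le_trans (hle a ha x (by simp)) (hx z hz)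
      obtain ⟨h1, h2⟩ := ih hxs acc hacc hle'
      refine ⟨h1, fun y => ?_⟩
      rw [h2]
      rw [List.mem_cons]
      constructor
      · rintro (hy | hy)
        · exact Or.inl hy
        · exact Or.inr (Or.inr hy)
      · rintro (hy | rfl | hy)
        · exact Or.inl hy
        · exact Or.inl hxmem
        · exact Or.inr hy

-- ===== VERDICT (by name: the statement is the Claim_ definition above) =====
theorem getTw_spec : Claim_equal_getTw := by
  unfold Claim_equal_getTw Spec_getTw
  intro Traces _
  unfold getTw getTw_alt
  set D := Traces.foldl (fun res inner => inner.foldl (fun res i => if i ∈ res then res else res ++ [i]) res) [] with hD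
  set F := Traces.foldl (fun flat inner => inner.foldl (fun flat i => flat ++ [i]) flat) [] with hF
  obtain ⟨hDnd, hDmem⟩ := dedupFold_outer Traces [] (by simp)
  have hFmem := flatFold_mem Traces []
  set S := PySem.List.sorted F (fun x => x) false with hS
  have hSsort : S.Pairwise (· ≤ ·) := by
    simpa using PySem.List.sorted_pairwise F (fun x => x)
  set R := S.foldl (fun res x => if res = [] ∨ res.getLast? ≠ some x then res ++ [x] else res) [] with hR
  obtain ⟨hRlt, hRmem⟩ := adjDedup_spec S hSsort [] (by simp) (by simp)
  have hRnd : R.Nodup := hRlt.imp ne_of_lt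
  have hmemRD : ∀ y, y ∈ R ↔ y ∈ D := by
    intro y
    rw [hRmem, hDmem]
    rw [PySem.List.mem_sorted, hFmem]
    simp
  have hperm : R.Perm D := (List.perm_ext_iff_of_nodup hRnd hDnd).mpr hmemRD
  exact PySem.List.sorted_eq_of_perm_of_pairwise_lt D R (fun x => x) hperm hRlt
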